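-- pv_equiv track=rewrite | github.com/e0in/AOC | AOC_2015/5.py | naughtyornice2
-- ===== SOURCE A (Python) =====
-- def naughtyornice2(instr):
--     test1 = False
--     for i in range(len(instr)-3):
--         substr = instr[i:i+2]
--         for j in range(i+2, len(instr)-1):
--             if substr == instr[j:j+2]:
--                 test1 = True
--
--     if not test1:
--         return False
--
--     for i in range(len(instr)-2):
--         if instr[i] == instr[i+2]:
--             return True
--
--     return False
-- ===== SOURCE B (Python) =====
-- def naughtyornice2(instr):
--     # One pass: map each two-char pair to its first index; a repeat with gap >= 2 wins.
--     first = {}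
--     pair = False
--     for i in range(len(instr) - 1):
--         key = (instr[i], instr[i + 1])
--         if key in first:
--             if i - first[key] >= 2:
--                 pair = True
--                 break
--         else:
--             first[key] = i
--     if not pair:
--         return False
--     return any(instr[i] == instr[i + 2] for i in range(len(instr) - 2))
-- ===== Notes on version B (the rewrite author's own statement) =====
-- stated objective: faster
-- what changed: Replaced the quadratic nested scan comparing every pair substring against all later ones by a single pass that records each two-char pair's first index in a dict and reports a repeat at gap >= 2 (and an any() one-liner for the sandwich check).
import Mathlib
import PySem

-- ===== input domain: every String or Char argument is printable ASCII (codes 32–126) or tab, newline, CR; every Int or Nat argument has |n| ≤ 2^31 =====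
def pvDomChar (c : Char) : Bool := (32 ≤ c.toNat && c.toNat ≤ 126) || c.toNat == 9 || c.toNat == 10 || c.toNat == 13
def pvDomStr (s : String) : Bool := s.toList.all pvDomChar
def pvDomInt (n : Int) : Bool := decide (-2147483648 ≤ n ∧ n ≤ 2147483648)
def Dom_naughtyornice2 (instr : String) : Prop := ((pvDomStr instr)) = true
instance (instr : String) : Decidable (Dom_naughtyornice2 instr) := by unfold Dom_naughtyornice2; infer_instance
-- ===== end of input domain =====

-- B replaces A's O(n^2) nested pair scan by one O(n) pass keyed on a first-occurrence dict (objective: faster).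

-- ===== PORT A =====
-- A's second loop ('for i in range(len(instr)-2): if instr[i]==instr[i+2]: return True' then 'return False')
def pvA_loop2 (lst : List Char) : List Int → Bool
  | [] => false
  | i :: rest =>
    if PySem.List.pyGetD lst i ' ' = PySem.List.pyGetD lst (i + 2) ' ' then true
    else pvA_loop2 lst rest

def naughtyornice2 (instr : String) : Bool :=
  let lst := instr.toList
  let n : Int := lst.length
  let test1 := (PySem.List.pyRange 0 (n - 3) 1).foldl (fun t1 i =>
      let substr := PySem.List.slice lst (some i) (some (i + 2))
      (PySem.List.pyRange (i + 2) (n - 1) 1).foldl (fun t1 j =>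
        if substr = PySem.List.slice lst (some j) (some (j + 2)) then true else t1) t1)
    false
  if !test1 then false
  else pvA_loop2 lst (PySem.List.pyRange 0 (n - 2) 1)

-- ===== PORT B =====
-- B's single pass: dict 'first' maps a two-char pair to its first index; repeat at gap >= 2 breaks with pair=True
def pvB_pairLoop (lst : List Char) : List Int → PySem.Dict (Char × Char) Int → Bool
  | [], _ => false
  | i :: rest, first =>
    let key := (PySem.List.pyGetD lst i ' ', PySem.List.pyGetD lst (i + 1) ' ')
    match first.get? key with
    | some j => if 2 ≤ i - j then true else pvB_pairLoop lst rest first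
    | none => pvB_pairLoop lst rest (first.insert key i)

def naughtyornice2_alt (instr : String) : Bool :=
  let lst := instr.toList
  let n : Int := lst.length
  if pvB_pairLoop lst (PySem.List.pyRange 0 (n - 1) 1) PySem.Dict.empty then
    (PySem.List.pyRange 0 (n - 2) 1).any (fun i =>
      PySem.List.pyGetD lst i ' ' == PySem.List.pyGetD lst (i + 2) ' ')
  else false

-- ===== PRECONDITION & SPEC =====
def Spec_naughtyornice2 (instr : String) (out : Bool) : Prop := out = naughtyornice2_alt instr
instance (instr : String) (out : Bool) : Decidable (Spec_naughtyornice2 instr out) := by unfold Spec_naughtyornice2; infer_instance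

-- ===== CLAIM (what is proved, stated in full; the proofs are below) =====
def Claim_equal_naughtyornice2 : Prop := ∀ (instr : String), Dom_naughtyornice2 instr → Spec_naughtyornice2 instr (naughtyornice2 instr)

-- ===== LEMMAS AND PROOFS =====
def pvPairAt (lst : List Char) (k : Nat) : Char × Char := (lst.getD k ' ', lst.getD (k + 1) ' ')
def pvHasPair (lst : List Char) (a : Nat) : Prop :=
  ∃ i j : Nat, a ≤ i ∧ i + 1 < lst.length ∧ j + 2 ≤ i ∧ pvPairAt lst j = pvPairAt lst i

lemma pv_slice_two (lst : List Char) (k : Nat) (h : k + 2 ≤ lst.length) :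
    PySem.List.slice lst (some (k : Int)) (some ((k : Int) + 2)) =
      [lst.getD k ' ', lst.getD (k + 1) ' '] := by
  have h2 : ((k : Int) + 2) = ((k + 2 : Nat) : Int) := by push_cast; ring
  have hk : k < lst.length := by omega
  have hk1 : k + 1 < lst.length := by omega
  rw [h2, PySem.List.slice_natCast]
  have e1 : List.take (k + 2 - k) (List.drop k lst) = [lst[k], lst[k + 1]] := by
    have : k + 2 - k = 2 := by omega
    rw [this, List.drop_eq_getElem_cons hk, List.drop_eq_getElem_cons hk1]
    rfl
  rw [e1, List.getD_eq_getElem lst ' ' hk, List.getD_eq_getElem lst ' ' hk1]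

lemma pv_foldl_if_or {P : Int → Prop} [DecidablePred P] (l : List Int) (b : Bool) :
    l.foldl (fun t x => if P x then true else t) b = (b || l.any (fun x => decide (P x))) := by
  induction l generalizing b with
  | nil => simp
  | cons x xs ih =>
    rw [List.foldl_cons, ih]
    by_cases h : P x <;> simp [h]

lemma pv_foldl_or (g : Int → Bool) (l : List Int) (b : Bool) :
    l.foldl (fun t x => t || g x) b = (b || l.any g) := by
  induction l generalizing b with
  | nil => simp
  | cons x xs ih => simp [ih, Bool.or_assoc]

lemma pv_testA_iff (lst : List Char) :
    ((PySem.List.pyRange 0 ((lst.length : Int) - 3) 1).foldl (fun t1 i =>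
      (PySem.List.pyRange (i + 2) ((lst.length : Int) - 1) 1).foldl
        (fun t1 j => if PySem.List.slice lst (some i) (some (i + 2)) =
            PySem.List.slice lst (some j) (some (j + 2)) then true else t1) t1)
      false) = true ↔ pvHasPair lst 0 := by
  simp only [pv_foldl_if_or, pv_foldl_or, Bool.false_or, List.any_eq_true,
    PySem.List.mem_pyRange_one, decide_eq_true_eq]
  constructor
  · rintro ⟨i, ⟨hi0, hi3⟩, j, ⟨hj2, hj1⟩, hs⟩
    lift i to ℕ using hi0 with i'
    lift j to ℕ using (by omega) with j'
    rw [pv_slice_two lst i' (by omega), pv_slice_two lst j' (by omega)] at hs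
    simp only [List.cons.injEq, and_true] at hs
    simp only [List.getD] at hs
    exact ⟨j', i', by omega, by omega, by omega, by simp only [pvPairAt, Prod.mk.injEq, List.getD]; exact hs⟩
  · rintro ⟨I, J, _, hI, hJI, hpair⟩
    refine ⟨(J : Int), ⟨by omega, by omega⟩, (I : Int), ⟨by omega, by omega⟩, ?_⟩
    rw [pv_slice_two lst J (by omega), pv_slice_two lst I (by omega)]
    simp only [pvPairAt, Prod.mk.injEq, List.getD] at hpair
    simp only [List.cons.injEq, List.getD, and_true]
    exact hpair

def pvFirstOcc (lst : List Char) (key : Char × Char) (a : Nat) : Option Int :=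
  ((List.range a).find? (fun j => decide (pvPairAt lst j = key))).map (fun j => (j : Int))

lemma pv_find?_range_some {p : Nat → Bool} {a j : Nat}
    (h : (List.range a).find? p = some j) : j < a ∧ p j = true ∧ ∀ x < j, p x = false := by
  rw [List.find?_eq_some_iff_getElem] at h
  obtain ⟨hp, i, hi, hget, hmin⟩ := h
  rw [List.getElem_range] at hget
  subst hget
  refine ⟨by simpa using hi, hp, fun x hx => ?_⟩
  have := hmin x (by simpa using hx)
  simpa using this

lemma pv_find?_range_succ (p : Nat → Bool) (a : Nat) :
    (List.range (a + 1)).find? p =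
      ((List.range a).find? p).orElse (fun _ => if p a then some a else none) := by
  rw [List.range_succ, List.find?_append]
  cases hf : (List.range a).find? p <;> cases hpa : p a <;> simp [List.find?, hpa]

lemma pv_hasPair_succ (lst : List Char) (a : Nat)
    (hno : ∀ j : Nat, j + 2 ≤ a → pvPairAt lst j ≠ pvPairAt lst a) :
    pvHasPair lst (a + 1) ↔ pvHasPair lst a := by
  constructor
  · rintro ⟨i, j, h1, h2, h3, h4⟩; exact ⟨i, j, by omega, h2, h3, h4⟩
  · rintro ⟨i, j, h1, h2, h3, h4⟩
    rcases Nat.eq_or_lt_of_le h1 with heq | hlt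
    · exact absurd (heq ▸ h4) (hno j (heq ▸ h3))
    · exact ⟨i, j, hlt, h2, h3, h4⟩

lemma pv_pairLoop_spec (lst : List Char) (m : Nat) : ∀ (a : Nat) (d : PySem.Dict (Char × Char) Int),
    ((lst.length : Int) - 1 - (a : Int)).toNat = m →
    (∀ key, d.get? key = pvFirstOcc lst key a) →
    (pvB_pairLoop lst (PySem.List.pyRange (a : Int) ((lst.length : Int) - 1) 1) d = true ↔
      pvHasPair lst a) := by
  induction m with
  | zero =>
    intro a d hm hd
    rw [PySem.List.pyRange_one_eq_nil (by omega)]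
    simp only [pvB_pairLoop, Bool.false_eq_true, false_iff, pvHasPair]
    rintro ⟨i, j, h1, h2, h3, h4⟩
    omega
  | succ m ih =>
    intro a d hm hd
    have ha : (a : Int) < (lst.length : Int) - 1 := by omega
    have hlen : a + 2 ≤ lst.length := by omega
    have hcast : ((a : Int) + 1) = ((a + 1 : Nat) : Int) := by push_cast; ring
    rw [PySem.List.pyRange_one_cons ha]
    have hkey : (PySem.List.pyGetD lst (a : Int) ' ', PySem.List.pyGetD lst ((a : Int) + 1) ' ')
        = pvPairAt lst a := by
      rw [hcast]
      simp only [pvPairAt, PySem.List.pyGetD_natCast]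
    simp only [pvB_pairLoop, hkey, hd]
    cases hf : (List.range a).find? (fun j => decide (pvPairAt lst j = pvPairAt lst a)) with
    | none =>
      have hnone : pvFirstOcc lst (pvPairAt lst a) a = none := by
        simp [pvFirstOcc, hf]
      simp only [hnone]
      have hno : ∀ j : Nat, j + 2 ≤ a → pvPairAt lst j ≠ pvPairAt lst a := by
        intro j hj hcontra
        have := List.find?_eq_none.mp hf j (List.mem_range.mpr (by omega))
        simp [hcontra] at this
      rw [hcast, ih (a + 1) _ (by omega) ?_, pv_hasPair_succ lst a hno]
      -- invariant for the inserted dict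
      intro key'
      by_cases hk : key' = pvPairAt lst a
      · subst hk
        rw [PySem.Dict.get?_insert_self]
        simp [pvFirstOcc, pv_find?_range_succ, hf]
      · rw [PySem.Dict.get?_insert_of_ne _ _ hk, hd key']
        have hpa : (decide (pvPairAt lst a = key')) = false := by
          simp; exact fun h => hk h.symm
        simp [pvFirstOcc, pv_find?_range_succ, hpa]
    | some j0 =>
      obtain ⟨hj0a, hpj, hmin⟩ := pv_find?_range_some hf
      rw [decide_eq_true_eq] at hpj
      have hsome : pvFirstOcc lst (pvPairAt lst a) a = some (j0 : Int) := by
        simp [pvFirstOcc, hf]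
      simp only [hsome]
      by_cases hgap : 2 ≤ (a : Int) - (j0 : Int)
      · simp only [if_pos hgap, true_iff]
        exact ⟨a, j0, le_refl a, by omega, by omega, hpj⟩
      · rw [if_neg hgap]
        have hno : ∀ j : Nat, j + 2 ≤ a → pvPairAt lst j ≠ pvPairAt lst a := by
          intro j hj hcontra
          have hjge : ¬ j < j0 := by
            intro hlt
            have := hmin j hlt
            simp [hcontra] at this
          omega
        rw [hcast, ih (a + 1) d (by omega) ?_, pv_hasPair_succ lst a hno]
        intro key'
        rw [hd key']
        by_cases hk : key' = pvPairAt lst a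
        · subst hk
          simp [pvFirstOcc, pv_find?_range_succ, hf]
        · have hpa : (decide (pvPairAt lst a = key')) = false := by
            simp; exact fun h => hk h.symm
          simp [pvFirstOcc, pv_find?_range_succ, hpa]

lemma pv_loop2_eq_any (lst : List Char) (l : List Int) :
    pvA_loop2 lst l =
      l.any (fun i => PySem.List.pyGetD lst i ' ' == PySem.List.pyGetD lst (i + 2) ' ') := by
  induction l with
  | nil => rfl
  | cons x xs ih =>
    by_cases h : PySem.List.pyGetD lst x ' ' = PySem.List.pyGetD lst (x + 2) ' ' <;>
      simp [pvA_loop2, h, ih]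

-- ===== VERDICT (by name: the statement is the Claim_ definition above) =====
theorem naughtyornice2_spec : Claim_equal_naughtyornice2 := by
  intro instr _
  show naughtyornice2 instr = naughtyornice2_alt instr
  have hinv : ∀ key, (PySem.Dict.empty : PySem.Dict (Char × Char) Int).get? key =
      pvFirstOcc instr.toList key 0 := by
    intro key; simp [pvFirstOcc, PySem.Dict.get?_empty]
  have hB := pv_pairLoop_spec instr.toList (((instr.toList.length : Int) - 1 - ((0 : Nat) : Int)).toNat)
    0 PySem.Dict.empty rfl hinv
  rw [Nat.cast_zero] at hB
  simp only [naughtyornice2, naughtyornice2_alt]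
  have ht : ((PySem.List.pyRange 0 ((instr.toList.length : Int) - 3) 1).foldl (fun t1 i =>
      (PySem.List.pyRange (i + 2) ((instr.toList.length : Int) - 1) 1).foldl
        (fun t1 j => if PySem.List.slice instr.toList (some i) (some (i + 2)) =
            PySem.List.slice instr.toList (some j) (some (j + 2)) then true else t1) t1)
      false) = pvB_pairLoop instr.toList
        (PySem.List.pyRange 0 ((instr.toList.length : Int) - 1) 1) PySem.Dict.empty := by
    rw [Bool.eq_iff_iff, pv_testA_iff, hB]
  rw [ht]
  cases h : pvB_pairLoop instr.toList
      (PySem.List.pyRange 0 ((instr.toList.length : Int) - 1) 1) PySem.Dict.empty <;>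
    simp [pv_loop2_eq_any]
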